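-- pv_equiv track=rewrite | github.com/bishnu133/bubblegum | bubblegum/core/sdk.py | _infer_action_type
-- ===== SOURCE A (Python) =====
-- def _infer_action_type(instruction: str, kwargs: dict) -> str:
--     """Infer action_type from kwargs or instruction text."""
--     if "action_type" in kwargs:
--         return kwargs["action_type"]
--     lowered = instruction.lower()
--     if any(w in lowered for w in ("type", "enter", "fill", "input")):
--         return "type"
--     if any(w in lowered for w in ("select", "choose", "pick")):
--         return "select"
--     if any(w in lowered for w in ("scroll",)):
--         return "scroll"
--     if any(w in lowered for w in ("verify", "check", "assert", "visible", "present")):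
--         return "verify"
--     if any(w in lowered for w in ("extract", "get", "read", "fetch")):
--         return "extract"
--     return "click"  # default
-- ===== SOURCE B (Python) =====
-- # B: flat keyword->rank map + min over matched ranks, instead of A's chain of
-- # five if/any branches; the minimum rank equals the first matching group.
-- _KEYWORD_RANK = {
--     "type": 0, "enter": 0, "fill": 0, "input": 0,
--     "select": 1, "choose": 1, "pick": 1,
--     "scroll": 2,
--     "verify": 3, "check": 3, "assert": 3, "visible": 3, "present": 3,
--     "extract": 4, "get": 4, "read": 4, "fetch": 4,
-- }
-- _ACTIONS = ["type", "select", "scroll", "verify", "extract", "click"]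
--
-- def _infer_action_type(instruction: str, kwargs: dict) -> str:
--     """Infer action_type: minimum rank over a flat keyword->rank map."""
--     if "action_type" in kwargs:
--         return kwargs["action_type"]
--     lowered = instruction.lower()
--     best = min((rank for kw, rank in _KEYWORD_RANK.items() if kw in lowered),
--                default=len(_ACTIONS) - 1)
--     return _ACTIONS[best]
-- ===== Notes on version B (the rewrite author's own statement) =====
-- stated objective: alternative
-- what changed: Replaces A's ordered chain of five if/any group tests by a flat keyword-to-rank map: B collects the ranks of ALL matching keywords in one pass and indexes the action list by the minimum rank (default = last index), instead of short-circuiting group by group.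
import Mathlib
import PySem

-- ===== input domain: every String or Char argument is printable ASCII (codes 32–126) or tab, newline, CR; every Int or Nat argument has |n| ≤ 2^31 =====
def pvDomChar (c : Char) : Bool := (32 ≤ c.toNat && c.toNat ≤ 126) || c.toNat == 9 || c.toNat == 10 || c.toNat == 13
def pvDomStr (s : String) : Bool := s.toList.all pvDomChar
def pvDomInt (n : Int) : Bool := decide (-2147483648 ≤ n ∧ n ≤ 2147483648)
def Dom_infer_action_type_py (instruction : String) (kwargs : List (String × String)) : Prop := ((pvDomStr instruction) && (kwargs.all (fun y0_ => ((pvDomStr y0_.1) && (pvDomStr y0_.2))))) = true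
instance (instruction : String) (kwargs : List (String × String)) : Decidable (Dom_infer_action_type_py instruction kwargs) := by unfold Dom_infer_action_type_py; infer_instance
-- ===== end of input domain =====

-- B replaces A's chain of five if/any group tests by a flat keyword->rank map:
-- it collects the ranks of all matching keywords and indexes the action list by
-- the minimum rank (alternative decomposition, same cost).


-- ===== PORT A =====
def infer_action_type_py (instruction : String) (kwargs : List (String × String)) : String :=
  let d := PySem.Dict.mk kwargs
  match d.get? "action_type" with
  | some v => v
  | none =>
    let lowered := PySem.Str.lower instruction
    if (["type", "enter", "fill", "input"].any (fun w => PySem.Str.isIn w lowered)) then "type"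
    else if (["select", "choose", "pick"].any (fun w => PySem.Str.isIn w lowered)) then "select"
    else if (["scroll"].any (fun w => PySem.Str.isIn w lowered)) then "scroll"
    else if (["verify", "check", "assert", "visible", "present"].any (fun w => PySem.Str.isIn w lowered)) then "verify"
    else if (["extract", "get", "read", "fetch"].any (fun w => PySem.Str.isIn w lowered)) then "extract"
    else "click"

-- ===== PORT B =====
def pvKeywordRank : List (String × Nat) :=
  [("type", 0), ("enter", 0), ("fill", 0), ("input", 0),
   ("select", 1), ("choose", 1), ("pick", 1),
   ("scroll", 2),
   ("verify", 3), ("check", 3), ("assert", 3), ("visible", 3), ("present", 3),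
   ("extract", 4), ("get", 4), ("read", 4), ("fetch", 4)]

def pvActions : List String := ["type", "select", "scroll", "verify", "extract", "click"]

def infer_action_type_py_alt (instruction : String) (kwargs : List (String × String)) : String :=
  match (PySem.Dict.mk kwargs).get? "action_type" with
  | some v => v
  | none =>
    let lowered := PySem.Str.lower instruction
    -- min(generator, default = len(_ACTIONS) - 1)
    let best := (PySem.List.min?
        (pvKeywordRank.filterMap (fun p => if PySem.Str.isIn p.1 lowered then some p.2 else none))
        (fun r => r)).getD (pvActions.length - 1)
    -- _ACTIONS[best]: best ≤ 5 = len - 1 always, so Python's indexing never raises; getD is exact here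
    pvActions.getD best "click"

-- ===== PRECONDITION & SPEC =====
def Spec_infer_action_type_py (instruction : String) (kwargs : List (String × String)) (out : String) : Prop := out = infer_action_type_py_alt instruction kwargs
instance (instruction : String) (kwargs : List (String × String)) (out : String) : Decidable (Spec_infer_action_type_py instruction kwargs out) := by unfold Spec_infer_action_type_py; infer_instance

-- ===== CLAIM (what is proved, stated in full; the proofs are below) =====
def Claim_equal_infer_action_type_py : Prop := ∀ (instruction : String) (kwargs : List (String × String)), Dom_infer_action_type_py instruction kwargs → Spec_infer_action_type_py instruction kwargs (infer_action_type_py instruction kwargs)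

-- ===== LEMMAS AND PROOFS =====

-- min(x :: t, default = 5) = x when x bounds t from below
theorem pv_minD_cons (x : Nat) (t : List Nat) (h : ∀ y ∈ t, x ≤ y) :
    (PySem.List.min? (x :: t) (fun r => r)).getD 5 = x := by
  rw [PySem.List.min?_id_cons]
  simp only [Option.getD_some]
  rcases PySem.List.foldl_min_mem t x with h0 | h0
  · exact h0
  · exact le_antisymm (PySem.List.foldl_min_le t x).1 (h _ h0)

-- every rank collected from a table whose ranks are all ≥ r is ≥ r
theorem pv_lb_filterMap (q : String → Bool) (r : Nat) (l : List (String × Nat))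
    (h : ∀ p ∈ l, r ≤ p.2) :
    ∀ y ∈ l.filterMap (fun p => if q p.1 then some p.2 else none), r ≤ y := by
  intro y hy
  rcases List.mem_filterMap.mp hy with ⟨p, hp, he⟩
  split at he
  · cases he; exact h p hp
  · cases he

-- ===== VERDICT (by name: the statement is the Claim_ definition above) =====
theorem infer_action_type_py_spec : Claim_equal_infer_action_type_py := by
  intro instruction kwargs _
  unfold Spec_infer_action_type_py infer_action_type_py infer_action_type_py_alt
  cases h : (PySem.Dict.mk kwargs).get? "action_type" with
  | some v => simp only [h]
  | none =>
    simp only [h, pvKeywordRank]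
    set L := PySem.Str.lower instruction with hL
    cases h1 : PySem.Str.isIn "type" L with
    | true =>
      rw [List.filterMap_cons_some (by rw [h1]; rfl)]
      rw [show pvActions.length - 1 = 5 from rfl]
      rw [pv_minD_cons 0 _ (pv_lb_filterMap (fun s => PySem.Str.isIn s L) 0 [("enter", 0), ("fill", 0), ("input", 0), ("select", 1), ("choose", 1), ("pick", 1), ("scroll", 2), ("verify", 3), ("check", 3), ("assert", 3), ("visible", 3), ("present", 3), ("extract", 4), ("get", 4), ("read", 4), ("fetch", 4)] (by decide))]
      simp at h1
      simp [pvActions, h1]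
    | false =>
      cases h2 : PySem.Str.isIn "enter" L with
      | true =>
        rw [List.filterMap_cons_none (by rw [h1]; rfl), List.filterMap_cons_some (by rw [h2]; rfl)]
        rw [show pvActions.length - 1 = 5 from rfl]
        rw [pv_minD_cons 0 _ (pv_lb_filterMap (fun s => PySem.Str.isIn s L) 0 [("fill", 0), ("input", 0), ("select", 1), ("choose", 1), ("pick", 1), ("scroll", 2), ("verify", 3), ("check", 3), ("assert", 3), ("visible", 3), ("present", 3), ("extract", 4), ("get", 4), ("read", 4), ("fetch", 4)] (by decide))]
        simp at h1 h2
        simp [pvActions, h1, h2]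
      | false =>
        cases h3 : PySem.Str.isIn "fill" L with
        | true =>
          rw [List.filterMap_cons_none (by rw [h1]; rfl), List.filterMap_cons_none (by rw [h2]; rfl), List.filterMap_cons_some (by rw [h3]; rfl)]
          rw [show pvActions.length - 1 = 5 from rfl]
          rw [pv_minD_cons 0 _ (pv_lb_filterMap (fun s => PySem.Str.isIn s L) 0 [("input", 0), ("select", 1), ("choose", 1), ("pick", 1), ("scroll", 2), ("verify", 3), ("check", 3), ("assert", 3), ("visible", 3), ("present", 3), ("extract", 4), ("get", 4), ("read", 4), ("fetch", 4)] (by decide))]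
          simp at h1 h2 h3
          simp [pvActions, h1, h2, h3]
        | false =>
          cases h4 : PySem.Str.isIn "input" L with
          | true =>
            rw [List.filterMap_cons_none (by rw [h1]; rfl), List.filterMap_cons_none (by rw [h2]; rfl), List.filterMap_cons_none (by rw [h3]; rfl), List.filterMap_cons_some (by rw [h4]; rfl)]
            rw [show pvActions.length - 1 = 5 from rfl]
            rw [pv_minD_cons 0 _ (pv_lb_filterMap (fun s => PySem.Str.isIn s L) 0 [("select", 1), ("choose", 1), ("pick", 1), ("scroll", 2), ("verify", 3), ("check", 3), ("assert", 3), ("visible", 3), ("present", 3), ("extract", 4), ("get", 4), ("read", 4), ("fetch", 4)] (by decide))]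
            simp at h1 h2 h3 h4
            simp [pvActions, h1, h2, h3, h4]
          | false =>
            cases h5 : PySem.Str.isIn "select" L with
            | true =>
              rw [List.filterMap_cons_none (by rw [h1]; rfl), List.filterMap_cons_none (by rw [h2]; rfl), List.filterMap_cons_none (by rw [h3]; rfl), List.filterMap_cons_none (by rw [h4]; rfl), List.filterMap_cons_some (by rw [h5]; rfl)]
              rw [show pvActions.length - 1 = 5 from rfl]
              rw [pv_minD_cons 1 _ (pv_lb_filterMap (fun s => PySem.Str.isIn s L) 1 [("choose", 1), ("pick", 1), ("scroll", 2), ("verify", 3), ("check", 3), ("assert", 3), ("visible", 3), ("present", 3), ("extract", 4), ("get", 4), ("read", 4), ("fetch", 4)] (by decide))]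
              simp at h1 h2 h3 h4 h5
              simp [pvActions, h1, h2, h3, h4, h5]
            | false =>
              cases h6 : PySem.Str.isIn "choose" L with
              | true =>
                rw [List.filterMap_cons_none (by rw [h1]; rfl), List.filterMap_cons_none (by rw [h2]; rfl), List.filterMap_cons_none (by rw [h3]; rfl), List.filterMap_cons_none (by rw [h4]; rfl), List.filterMap_cons_none (by rw [h5]; rfl), List.filterMap_cons_some (by rw [h6]; rfl)]
                rw [show pvActions.length - 1 = 5 from rfl]
                rw [pv_minD_cons 1 _ (pv_lb_filterMap (fun s => PySem.Str.isIn s L) 1 [("pick", 1), ("scroll", 2), ("verify", 3), ("check", 3), ("assert", 3), ("visible", 3), ("present", 3), ("extract", 4), ("get", 4), ("read", 4), ("fetch", 4)] (by decide))]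
                simp at h1 h2 h3 h4 h5 h6
                simp [pvActions, h1, h2, h3, h4, h5, h6]
              | false =>
                cases h7 : PySem.Str.isIn "pick" L with
                | true =>
                  rw [List.filterMap_cons_none (by rw [h1]; rfl), List.filterMap_cons_none (by rw [h2]; rfl), List.filterMap_cons_none (by rw [h3]; rfl), List.filterMap_cons_none (by rw [h4]; rfl), List.filterMap_cons_none (by rw [h5]; rfl), List.filterMap_cons_none (by rw [h6]; rfl), List.filterMap_cons_some (by rw [h7]; rfl)]
                  rw [show pvActions.length - 1 = 5 from rfl]
                  rw [pv_minD_cons 1 _ (pv_lb_filterMap (fun s => PySem.Str.isIn s L) 1 [("scroll", 2), ("verify", 3), ("check", 3), ("assert", 3), ("visible", 3), ("present", 3), ("extract", 4), ("get", 4), ("read", 4), ("fetch", 4)] (by decide))]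
                  simp at h1 h2 h3 h4 h5 h6 h7
                  simp [pvActions, h1, h2, h3, h4, h5, h6, h7]
                | false =>
                  cases h8 : PySem.Str.isIn "scroll" L with
                  | true =>
                    rw [List.filterMap_cons_none (by rw [h1]; rfl), List.filterMap_cons_none (by rw [h2]; rfl), List.filterMap_cons_none (by rw [h3]; rfl), List.filterMap_cons_none (by rw [h4]; rfl), List.filterMap_cons_none (by rw [h5]; rfl), List.filterMap_cons_none (by rw [h6]; rfl), List.filterMap_cons_none (by rw [h7]; rfl), List.filterMap_cons_some (by rw [h8]; rfl)]
                    rw [show pvActions.length - 1 = 5 from rfl]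
                    rw [pv_minD_cons 2 _ (pv_lb_filterMap (fun s => PySem.Str.isIn s L) 2 [("verify", 3), ("check", 3), ("assert", 3), ("visible", 3), ("present", 3), ("extract", 4), ("get", 4), ("read", 4), ("fetch", 4)] (by decide))]
                    simp at h1 h2 h3 h4 h5 h6 h7 h8
                    simp [pvActions, h1, h2, h3, h4, h5, h6, h7, h8]
                  | false =>
                    cases h9 : PySem.Str.isIn "verify" L with
                    | true =>
                      rw [List.filterMap_cons_none (by rw [h1]; rfl), List.filterMap_cons_none (by rw [h2]; rfl), List.filterMap_cons_none (by rw [h3]; rfl), List.filterMap_cons_none (by rw [h4]; rfl), List.filterMap_cons_none (by rw [h5]; rfl), List.filterMap_cons_none (by rw [h6]; rfl), List.filterMap_cons_none (by rw [h7]; rfl), List.filterMap_cons_none (by rw [h8]; rfl), List.filterMap_cons_some (by rw [h9]; rfl)]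
                      rw [show pvActions.length - 1 = 5 from rfl]
                      rw [pv_minD_cons 3 _ (pv_lb_filterMap (fun s => PySem.Str.isIn s L) 3 [("check", 3), ("assert", 3), ("visible", 3), ("present", 3), ("extract", 4), ("get", 4), ("read", 4), ("fetch", 4)] (by decide))]
                      simp at h1 h2 h3 h4 h5 h6 h7 h8 h9
                      simp [pvActions, h1, h2, h3, h4, h5, h6, h7, h8, h9]
                    | false =>
                      cases h10 : PySem.Str.isIn "check" L with
                      | true =>
                        rw [List.filterMap_cons_none (by rw [h1]; rfl), List.filterMap_cons_none (by rw [h2]; rfl), List.filterMap_cons_none (by rw [h3]; rfl), List.filterMap_cons_none (by rw [h4]; rfl), List.filterMap_cons_none (by rw [h5]; rfl), List.filterMap_cons_none (by rw [h6]; rfl), List.filterMap_cons_none (by rw [h7]; rfl), List.filterMap_cons_none (by rw [h8]; rfl), List.filterMap_cons_none (by rw [h9]; rfl), List.filterMap_cons_some (by rw [h10]; rfl)]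
                        rw [show pvActions.length - 1 = 5 from rfl]
                        rw [pv_minD_cons 3 _ (pv_lb_filterMap (fun s => PySem.Str.isIn s L) 3 [("assert", 3), ("visible", 3), ("present", 3), ("extract", 4), ("get", 4), ("read", 4), ("fetch", 4)] (by decide))]
                        simp at h1 h2 h3 h4 h5 h6 h7 h8 h9 h10
                        simp [pvActions, h1, h2, h3, h4, h5, h6, h7, h8, h9, h10]
                      | false =>
                        cases h11 : PySem.Str.isIn "assert" L with
                        | true =>
                          rw [List.filterMap_cons_none (by rw [h1]; rfl), List.filterMap_cons_none (by rw [h2]; rfl), List.filterMap_cons_none (by rw [h3]; rfl), List.filterMap_cons_none (by rw [h4]; rfl), List.filterMap_cons_none (by rw [h5]; rfl), List.filterMap_cons_none (by rw [h6]; rfl), List.filterMap_cons_none (by rw [h7]; rfl), List.filterMap_cons_none (by rw [h8]; rfl), List.filterMap_cons_none (by rw [h9]; rfl), List.filterMap_cons_none (by rw [h10]; rfl), List.filterMap_cons_some (by rw [h11]; rfl)]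
                          rw [show pvActions.length - 1 = 5 from rfl]
                          rw [pv_minD_cons 3 _ (pv_lb_filterMap (fun s => PySem.Str.isIn s L) 3 [("visible", 3), ("present", 3), ("extract", 4), ("get", 4), ("read", 4), ("fetch", 4)] (by decide))]
                          simp at h1 h2 h3 h4 h5 h6 h7 h8 h9 h10 h11
                          simp [pvActions, h1, h2, h3, h4, h5, h6, h7, h8, h9, h10, h11]
                        | false =>
                          cases h12 : PySem.Str.isIn "visible" L with
                          | true =>
                            rw [List.filterMap_cons_none (by rw [h1]; rfl), List.filterMap_cons_none (by rw [h2]; rfl), List.filterMap_cons_none (by rw [h3]; rfl), List.filterMap_cons_none (by rw [h4]; rfl), List.filterMap_cons_none (by rw [h5]; rfl), List.filterMap_cons_none (by rw [h6]; rfl), List.filterMap_cons_none (by rw [h7]; rfl), List.filterMap_cons_none (by rw [h8]; rfl), List.filterMap_cons_none (by rw [h9]; rfl), List.filterMap_cons_none (by rw [h10]; rfl), List.filterMap_cons_none (by rw [h11]; rfl), List.filterMap_cons_some (by rw [h12]; rfl)]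
                            rw [show pvActions.length - 1 = 5 from rfl]
                            rw [pv_minD_cons 3 _ (pv_lb_filterMap (fun s => PySem.Str.isIn s L) 3 [("present", 3), ("extract", 4), ("get", 4), ("read", 4), ("fetch", 4)] (by decide))]
                            simp at h1 h2 h3 h4 h5 h6 h7 h8 h9 h10 h11 h12
                            simp [pvActions, h1, h2, h3, h4, h5, h6, h7, h8, h9, h10, h11, h12]
                          | false =>
                            cases h13 : PySem.Str.isIn "present" L with
                            | true =>
                              rw [List.filterMap_cons_none (by rw [h1]; rfl), List.filterMap_cons_none (by rw [h2]; rfl), List.filterMap_cons_none (by rw [h3]; rfl), List.filterMap_cons_none (by rw [h4]; rfl), List.filterMap_cons_none (by rw [h5]; rfl), List.filterMap_cons_none (by rw [h6]; rfl), List.filterMap_cons_none (by rw [h7]; rfl), List.filterMap_cons_none (by rw [h8]; rfl), List.filterMap_cons_none (by rw [h9]; rfl), List.filterMap_cons_none (by rw [h10]; rfl), List.filterMap_cons_none (by rw [h11]; rfl), List.filterMap_cons_none (by rw [h12]; rfl), List.filterMap_cons_some (by rw [h13]; rfl)]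
                              rw [show pvActions.length - 1 = 5 from rfl]
                              rw [pv_minD_cons 3 _ (pv_lb_filterMap (fun s => PySem.Str.isIn s L) 3 [("extract", 4), ("get", 4), ("read", 4), ("fetch", 4)] (by decide))]
                              simp at h1 h2 h3 h4 h5 h6 h7 h8 h9 h10 h11 h12 h13
                              simp [pvActions, h1, h2, h3, h4, h5, h6, h7, h8, h9, h10, h11, h12, h13]
                            | false =>
                              cases h14 : PySem.Str.isIn "extract" L with
                              | true =>
                                rw [List.filterMap_cons_none (by rw [h1]; rfl), List.filterMap_cons_none (by rw [h2]; rfl), List.filterMap_cons_none (by rw [h3]; rfl), List.filterMap_cons_none (by rw [h4]; rfl), List.filterMap_cons_none (by rw [h5]; rfl), List.filterMap_cons_none (by rw [h6]; rfl), List.filterMap_cons_none (by rw [h7]; rfl), List.filterMap_cons_none (by rw [h8]; rfl), List.filterMap_cons_none (by rw [h9]; rfl), List.filterMap_cons_none (by rw [h10]; rfl), List.filterMap_cons_none (by rw [h11]; rfl), List.filterMap_cons_none (by rw [h12]; rfl), List.filterMap_cons_none (by rw [h13]; rfl), List.filterMap_cons_some (by rw [h14]; rfl)]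
                                rw [show pvActions.length - 1 = 5 from rfl]
                                rw [pv_minD_cons 4 _ (pv_lb_filterMap (fun s => PySem.Str.isIn s L) 4 [("get", 4), ("read", 4), ("fetch", 4)] (by decide))]
                                simp at h1 h2 h3 h4 h5 h6 h7 h8 h9 h10 h11 h12 h13 h14
                                simp [pvActions, h1, h2, h3, h4, h5, h6, h7, h8, h9, h10, h11, h12, h13, h14]
                              | false =>
                                cases h15 : PySem.Str.isIn "get" L with
                                | true =>
                                  rw [List.filterMap_cons_none (by rw [h1]; rfl), List.filterMap_cons_none (by rw [h2]; rfl), List.filterMap_cons_none (by rw [h3]; rfl), List.filterMap_cons_none (by rw [h4]; rfl), List.filterMap_cons_none (by rw [h5]; rfl), List.filterMap_cons_none (by rw [h6]; rfl), List.filterMap_cons_none (by rw [h7]; rfl), List.filterMap_cons_none (by rw [h8]; rfl), List.filterMap_cons_none (by rw [h9]; rfl), List.filterMap_cons_none (by rw [h10]; rfl), List.filterMap_cons_none (by rw [h11]; rfl), List.filterMap_cons_none (by rw [h12]; rfl), List.filterMap_cons_none (by rw [h13]; rfl), List.filterMap_cons_none (by rw [h14]; rfl), List.filterMap_cons_some (by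 rw [h15]; rfl)]
                                  rw [show pvActions.length - 1 = 5 from rfl]
                                  rw [pv_minD_cons 4 _ (pv_lb_filterMap (fun s => PySem.Str.isIn s L) 4 [("read", 4), ("fetch", 4)] (by decide))]
                                  simp at h1 h2 h3 h4 h5 h6 h7 h8 h9 h10 h11 h12 h13 h14 h15
                                  simp [pvActions, h1, h2, h3, h4, h5, h6, h7, h8, h9, h10, h11, h12, h13, h14, h15]
                                | false =>
                                  cases h16 : PySem.Str.isIn "read" L with
                                  | true =>
                                    rw [List.filterMap_cons_none (by rw [h1]; rfl), List.filterMap_cons_none (by rw [h2]; rfl), List.filterMap_cons_none (by rw [h3]; rfl), List.filterMap_cons_none (by rw [h4]; rfl), List.filterMap_cons_none (by rw [h5]; rfl), List.filterMap_cons_none (by rw [h6]; rfl), List.filterMap_cons_none (by rw [h7]; rfl), List.filterMap_cons_none (by rw [h8]; rfl), List.filterMap_cons_none (by rw [h9]; rfl), List.filterMap_cons_none (by rw [h10]; rfl), List.filterMap_cons_none (by rw [h11]; rfl), List.filterMap_cons_none (by rw [h12]; rfl), List.filterMap_cons_none (by rw [h13]; rfl), List.filterMap_cons_none (by rw [h14];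 rfl), List.filterMap_cons_none (by rw [h15]; rfl), List.filterMap_cons_some (by rw [h16]; rfl)]
                                    rw [show pvActions.length - 1 = 5 from rfl]
                                    rw [pv_minD_cons 4 _ (pv_lb_filterMap (fun s => PySem.Str.isIn s L) 4 [("fetch", 4)] (by decide))]
                                    simp at h1 h2 h3 h4 h5 h6 h7 h8 h9 h10 h11 h12 h13 h14 h15 h16
                                    simp [pvActions, h1, h2, h3, h4, h5, h6, h7, h8, h9, h10, h11, h12, h13, h14, h15, h16]
                                  | false =>
                                    cases h17 : PySem.Str.isIn "fetch" L with
                                    | true =>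
                                      rw [List.filterMap_cons_none (by rw [h1]; rfl), List.filterMap_cons_none (by rw [h2]; rfl), List.filterMap_cons_none (by rw [h3]; rfl), List.filterMap_cons_none (by rw [h4]; rfl), List.filterMap_cons_none (by rw [h5]; rfl), List.filterMap_cons_none (by rw [h6]; rfl), List.filterMap_cons_none (by rw [h7]; rfl), List.filterMap_cons_none (by rw [h8]; rfl), List.filterMap_cons_none (by rw [h9]; rfl), List.filterMap_cons_none (by rw [h10]; rfl), List.filterMap_cons_none (by rw [h11]; rfl), List.filterMap_cons_none (by rw [h12]; rfl), List.filterMap_cons_none (by rw [h13]; rfl), List.filterMap_cons_none (by rw [h14]; rfl), List.filterMap_cons_none (by rw [h15]; rfl), List.filterMap_cons_none (by rw [h16]; rfl), List.filterMap_cons_some (by rw [h17]; rfl)]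
                                      rw [show pvActions.length - 1 = 5 from rfl]
                                      rw [pv_minD_cons 4 _ (pv_lb_filterMap (fun s => PySem.Str.isIn s L) 4 [] (by decide))]
                                      simp at h1 h2 h3 h4 h5 h6 h7 h8 h9 h10 h11 h12 h13 h14 h15 h16 h17
                                      simp [pvActions, h1, h2, h3, h4, h5, h6, h7, h8, h9, h10, h11, h12, h13, h14, h15, h16, h17]
                                    | false =>
                                      rw [List.filterMap_cons_none (by rw [h1]; rfl), List.filterMap_cons_none (by rw [h2]; rfl), List.filterMap_cons_none (by rw [h3]; rfl), List.filterMap_cons_none (by rw [h4]; rfl), List.filterMap_cons_none (by rw [h5]; rfl), List.filterMap_cons_none (by rw [h6]; rfl), List.filterMap_cons_none (by rw [h7]; rfl), List.filterMap_cons_none (by rw [h8]; rfl), List.filterMap_cons_none (by rw [h9]; rfl), List.filterMap_cons_none (by rw [h10]; rfl), List.filterMap_cons_none (by rw [h11]; rfl), List.filterMap_cons_none (by rw [h12]; rfl), List.filterMap_cons_none (by rw [h13]; rfl), List.filterMap_cons_none (by rw [h14]; rfl), List.filterMap_cons_none (by rw [h15]; rfl), List.filterMap_cons_none (by rw [h16];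 rfl), List.filterMap_cons_none (by rw [h17]; rfl)]
                                      simp at h1 h2 h3 h4 h5 h6 h7 h8 h9 h10 h11 h12 h13 h14 h15 h16 h17
                                      simp [pvActions, h1, h2, h3, h4, h5, h6, h7, h8, h9, h10, h11, h12, h13, h14, h15, h16, h17]
                                      rfl
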